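-- pv_equiv track=rewrite | github.com/maxganser/consistency-script | consistency.py | create_position_alignment
-- ===== SOURCE A (Python) =====
-- def create_position_alignment(alignment):
--     """
--         Given an alignment with multiple sequences, assign ascending numbers
--         to the nucleotides of each sequence representing their positions.
--         Positions with gaps are skipped and assigned 0.
--     """
--
--     position_alignment = []
--     for record in alignment:
--         position_sequence = []
--         pos = 1
--         for c in record:
--             if c == '-':
--                 # Assign 0 and skip gaps.
--                 position_sequence.append(0)
--             else:
--                 # Assign ascending numbers.
--                 position_sequence.append(pos)
--                 pos += 1
--         position_alignment.append(position_sequence)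
--
--     return position_alignment
-- ===== SOURCE B (Python) =====
-- def _positions(record):
--     # prefix-sum table of non-gap indicators
--     counts = []
--     total = 0
--     for c in record:
--         total += 0 if c == '-' else 1
--         counts.append(total)
--     # second pass: emit the running count at non-gaps, 0 at gaps
--     return [0 if c == '-' else k for c, k in zip(record, counts)]
--
-- def create_position_alignment(alignment):
--     return [_positions(record) for record in alignment]
-- ===== Notes on version B (the rewrite author's own statement) =====
-- stated objective: alternative
-- what changed: Replaces the inline mutable position counter with a precomputed prefix-sum table of non-gap indicators, then a second zipping pass that emits the count at non-gaps and 0 at gaps.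
import Mathlib
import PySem

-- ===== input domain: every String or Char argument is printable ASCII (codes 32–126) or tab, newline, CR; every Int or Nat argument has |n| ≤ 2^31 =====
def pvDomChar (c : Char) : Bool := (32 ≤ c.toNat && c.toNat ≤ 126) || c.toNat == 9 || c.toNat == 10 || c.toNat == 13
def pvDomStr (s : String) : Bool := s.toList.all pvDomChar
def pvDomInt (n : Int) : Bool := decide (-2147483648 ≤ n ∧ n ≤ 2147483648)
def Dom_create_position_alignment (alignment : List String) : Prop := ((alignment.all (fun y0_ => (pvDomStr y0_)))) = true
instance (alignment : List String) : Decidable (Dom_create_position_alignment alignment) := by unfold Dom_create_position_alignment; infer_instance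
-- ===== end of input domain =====

-- B replaces A's inline mutable position counter with a prefix-sum table of
-- non-gap indicators plus a zipping second pass (alternative decomposition).


-- ===== PORT A =====
-- inner loop: state = (position_sequence, pos)
def pvALoop (cs : List Char) (st : List Int × Int) : List Int × Int :=
  cs.foldl (fun st c =>
    if c = '-' then (st.1 ++ [(0 : Int)], st.2)
    else (st.1 ++ [st.2], st.2 + 1)) st

def create_position_alignment (alignment : List String) : List (List Int) :=
  alignment.foldl (fun acc record =>
    acc ++ [(pvALoop record.toList ([], 1)).1]) []

-- ===== PORT B =====
-- first pass: prefix sums of non-gap indicators (counts list), threading total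
def pvCounts : List Char → Int → List Int
  | [], _ => []
  | c :: cs, total =>
    let total' := total + (if c = '-' then 0 else 1)
    total' :: pvCounts cs total'

def create_position_alignment_alt (alignment : List String) : List (List Int) :=
  alignment.map (fun record =>
    let cs := record.toList
    (cs.zip (pvCounts cs 0)).map (fun p => if p.1 = '-' then (0 : Int) else p.2))

-- ===== PRECONDITION & SPEC =====
def Spec_create_position_alignment (alignment : List String) (out : List (List Int)) : Prop := out = create_position_alignment_alt alignment
instance (alignment : List String) (out : List (List Int)) : Decidable (Spec_create_position_alignment alignment out) := by unfold Spec_create_position_alignment; infer_instance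

-- ===== CLAIM (what is proved, stated in full; the proofs are below) =====
def Claim_equal_create_position_alignment : Prop := ∀ (alignment : List String), Dom_create_position_alignment alignment → Spec_create_position_alignment alignment (create_position_alignment alignment)

-- ===== LEMMAS AND PROOFS =====

theorem pvALoop_eq (cs : List Char) (acc : List Int) (pos : Int) :
    (pvALoop cs (acc, pos)).1
      = acc ++ (cs.zip (pvCounts cs (pos - 1))).map
          (fun p => if p.1 = '-' then (0 : Int) else p.2) := by
  induction cs generalizing acc pos with
  | nil => simp [pvALoop]
  | cons c cs ih =>
    by_cases h : c = '-'
    · simp [pvALoop, List.foldl_cons, h, pvCounts]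
      have := ih (acc ++ [(0 : Int)]) pos
      simpa [pvALoop] using this
    · simp [pvALoop, List.foldl_cons, h, pvCounts]
      have := ih (acc ++ [pos]) (pos + 1)
      have h2 : pos + 1 - 1 = pos - 1 + 1 := by ring
      simpa [pvALoop, h2] using this

theorem outer_eq (alignment : List String) (acc : List (List Int)) :
    alignment.foldl (fun acc record => acc ++ [(pvALoop record.toList ([], 1)).1]) acc
      = acc ++ alignment.map (fun record =>
          (record.toList.zip (pvCounts record.toList 0)).map
            (fun p => if p.1 = '-' then (0 : Int) else p.2)) := by
  induction alignment generalizing acc with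
  | nil => simp
  | cons r rs ih =>
    have h1 := pvALoop_eq r.toList [] 1
    simp only [List.foldl_cons, List.map_cons, ih]
    simp [h1]

-- ===== VERDICT (by name: the statement is the Claim_ definition above) =====
theorem create_position_alignment_spec : Claim_equal_create_position_alignment := by
  intro alignment _
  unfold Spec_create_position_alignment create_position_alignment create_position_alignment_alt
  simpa using outer_eq alignment []
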